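-- pv_equiv track=rewrite | github.com/BrockMTureski/DiscordMirror | mirror.py | remove_mentions
-- ===== SOURCE A (Python) =====
-- def remove_mentions(text):
--     new_text = text
--     try:
--         i = 0
--         while i < len(new_text):
--             if new_text[i] == '<' and i + 1 < len(new_text) and (new_text[i + 1] == '!' or new_text[i + 1] == '@'):
--                 for j in range(i, len(new_text), 1):
--                     if new_text[j] == '>':
--                         new_text = new_text[:i] + new_text[j + 1:]
--                         break
--             i += 1
--
--         return new_text.replace('   ', ' ').replace('  ', ' ')
--     except Exception as e:
--         return text
-- ===== SOURCE B (Python) =====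
-- def remove_mentions(text):
--     # Chunked single pass: find the next '<', copy the preceding chunk wholesale,
--     # and on a mention opener ('<@' / '<!') jump past its closing '>'.
--     out = []
--     i, n = 0, len(text)
--     while i < n:
--         j = text.find('<', i)
--         if j == -1:
--             out.append(text[i:])
--             break
--         if j + 1 < n and text[j + 1] in ('!', '@'):
--             k = text.find('>', j)
--             if k != -1:
--                 out.append(text[i:j])
--                 i = k + 1
--                 continue
--         out.append(text[i:j + 1])
--         i = j + 1
--     return ''.join(out).replace('   ', ' ').replace('  ', ' ')
-- ===== Notes on version B (the rewrite author's own statement) =====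
-- stated objective: faster
-- what changed: B replaces A's splice-and-rescan loop (rebuilding the whole string after every deleted mention) by a chunked single pass that str.find's the next '<', copies the preceding chunk wholesale and jumps past each mention token; it also removes every mention, including a mention immediately following another, which A accidentally skips.
-- intended difference: On texts containing a mention token immediately followed by another mention opener with a later '>' (pattern '<[!@][^>]*><[!@]...>'), A's unconditional i += 1 after a splice skips the second token's '<' so that token survives (A returns e.g. '<@b>' for '<@a><@b>'), while B removes both mentions (returns ''), which is the intended behaviour of a mention stripper. — e.g. on remove_mentions("<@a><@b>"): A returns "<@b>", B returns ""
import Mathlib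
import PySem

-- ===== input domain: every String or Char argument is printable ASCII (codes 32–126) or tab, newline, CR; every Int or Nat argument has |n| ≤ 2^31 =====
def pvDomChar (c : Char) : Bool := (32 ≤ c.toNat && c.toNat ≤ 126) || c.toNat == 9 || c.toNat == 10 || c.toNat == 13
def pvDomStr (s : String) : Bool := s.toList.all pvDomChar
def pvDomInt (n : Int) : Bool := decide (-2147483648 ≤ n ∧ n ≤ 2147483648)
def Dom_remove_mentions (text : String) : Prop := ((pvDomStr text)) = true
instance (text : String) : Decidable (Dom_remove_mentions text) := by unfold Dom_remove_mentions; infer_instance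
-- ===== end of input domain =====

-- B is a chunked single pass (find the next '<', copy the chunk before it, jump past each mention
-- token) instead of A's splice-and-rescan loop; on texts where a mention is immediately followed by
-- another mention, A's unconditional `i += 1` after the splice leaves the second mention in place,
-- and B (intentionally) removes it: that region is D_remove_mentions below.

-- ===== PORT A =====
-- A's inner `for j in range(i, len)` scan: first index j ≥ i with s[j] = '>'
def pvFindGt (fuel : Nat) (s : List Char) (i : Nat) : Option Nat :=
  match fuel with
  | 0 => none
  | f + 1 =>
    if i < s.length then
      if s.getD i ' ' = '>' then some i else pvFindGt f s (i + 1)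
    else none

-- port of A: while-loop over the evolving string `new_text` with index i
def pvCoreA : Nat → List Char → Nat → List Char
  | 0, s, _ => s
  | fuel + 1, s, i =>
    if i < s.length then
      if s.getD i ' ' = '<' ∧ i + 1 < s.length ∧ (s.getD (i + 1) ' ' = '!' ∨ s.getD (i + 1) ' ' = '@') then
        match pvFindGt s.length s i with
        | some j => pvCoreA fuel (s.take i ++ s.drop (j + 1)) (i + 1)
        | none => pvCoreA fuel s (i + 1)
      else pvCoreA fuel s (i + 1)
    else s

-- the try/except of A can never fire (all indexing is guarded), so no Pre_ is needed
def remove_mentions (text : String) : String :=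
  PySem.Str.replace (PySem.Str.replace (String.ofList (pvCoreA text.toList.length text.toList 0)) "   " " ") "  " " "

-- ===== PORT B =====
-- B's `text.find('<', i)` scan: first index j ≥ i with s[j] = '<'
def pvFindLt (fuel : Nat) (s : List Char) (i : Nat) : Option Nat :=
  match fuel with
  | 0 => none
  | f + 1 =>
    if i < s.length then
      if s.getD i ' ' = '<' then some i else pvFindLt f s (i + 1)
    else none

-- port of B: chunked pass over the (never modified) text; `text[a:b]` is (s.drop a).take (b - a)
def pvCoreB : Nat → List Char → Nat → List Char → List Char
  | 0, _, _, out => out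
  | fuel + 1, s, i, out =>
    if i < s.length then
      match pvFindLt s.length s i with
      | none => out ++ s.drop i
      | some j =>
        if j + 1 < s.length ∧ (s.getD (j + 1) ' ' = '!' ∨ s.getD (j + 1) ' ' = '@') then
          match pvFindGt s.length s j with
          | some k => pvCoreB fuel s (k + 1) (out ++ (s.drop i).take (j - i))
          | none => pvCoreB fuel s (j + 1) (out ++ (s.drop i).take (j + 1 - i))
        else pvCoreB fuel s (j + 1) (out ++ (s.drop i).take (j + 1 - i))
    else out

def remove_mentions_alt (text : String) : String :=
  PySem.Str.replace (PySem.Str.replace (String.ofList (pvCoreB text.toList.length text.toList 0 [])) "   " " ") "  " " "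

-- ===== PRECONDITION & SPEC =====
-- the input pattern on which A and B differ: a mention opener '<'[!@], its closing '>' (the first
-- '>' after the opener), immediately followed by another opener '<'[!@] that has a later '>'
def pvAfterGt : List Char → Bool
  | [] => false
  | c :: t =>
    if c = '>' then
      t.headD ' ' = '<' && ((t.drop 1).headD ' ' = '!' || (t.drop 1).headD ' ' = '@') && t.contains '>'
    else pvAfterGt t

def pvHasPat : List Char → Bool
  | [] => false
  | c :: t => (c = '<' && (t.headD ' ' = '!' || t.headD ' ' = '@') && pvAfterGt t) || pvHasPat t

-- On texts containing a mention token immediately followed by another mention opener with a later '>',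
-- A's `i += 1` after the splice skips the second opener so that mention survives (A('<@a><@b>') = '<@b>'),
-- while B removes both mentions (B('<@a><@b>') = ''), the intended behaviour of a mention stripper.
def D_remove_mentions (text : String) : Prop := pvHasPat text.toList = true
instance (text : String) : Decidable (D_remove_mentions text) := by unfold D_remove_mentions; infer_instance

def Spec_remove_mentions (text : String) (out : String) : Prop := ¬ D_remove_mentions text → out = remove_mentions_alt text
instance (text : String) (out : String) : Decidable (Spec_remove_mentions text out) := by unfold Spec_remove_mentions; infer_instance

def pvDiffWitness_remove_mentions : String := "<@a><@b>"
def pvDiffWitnessOut_remove_mentions : String × String := ("<@b>", "")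

-- ===== CLAIM (what is proved, stated in full; the proofs are below) =====
def Claim_unchanged_remove_mentions : Prop := ∀ (text : String), Dom_remove_mentions text → Spec_remove_mentions text (remove_mentions text)
def Claim_changed_remove_mentions : Prop := Dom_remove_mentions (pvDiffWitness_remove_mentions) ∧ D_remove_mentions (pvDiffWitness_remove_mentions) ∧ remove_mentions (pvDiffWitness_remove_mentions) = pvDiffWitnessOut_remove_mentions.1 ∧ remove_mentions_alt (pvDiffWitness_remove_mentions) = pvDiffWitnessOut_remove_mentions.2 ∧ pvDiffWitnessOut_remove_mentions.1 ≠ pvDiffWitnessOut_remove_mentions.2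
def Claim_exact_remove_mentions : Prop := ∀ (text : String), Dom_remove_mentions text → D_remove_mentions text → remove_mentions text ≠ remove_mentions_alt text

-- ===== LEMMAS AND PROOFS =====

-- semantic description of A's loop, acting on the remaining suffix
def pvG : List Char → List Char
  | [] => []
  | c :: rest =>
    if c = '<' ∧ (rest.headD ' ' = '!' ∨ rest.headD ' ' = '@') then
      match pvFindGt (c :: rest).length (c :: rest) 0 with
      | some r => ((c :: rest).drop (r + 1)).take 1 ++ pvG (((c :: rest).drop (r + 1)).drop 1)
      | none => c :: pvG rest
    else c :: pvG rest
termination_by s => s.length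
decreasing_by
  · simp only [List.drop_drop, List.length_drop, List.length_cons]
    omega
  · simp
  · simp

-- semantic description of B's loop, acting on the remaining suffix
def pvH : List Char → List Char
  | [] => []
  | c :: rest =>
    if c = '<' ∧ (rest.headD ' ' = '!' ∨ rest.headD ' ' = '@') then
      match pvFindGt (c :: rest).length (c :: rest) 0 with
      | some r => pvH ((c :: rest).drop (r + 1))
      | none => c :: pvH rest
    else c :: pvH rest
termination_by s => s.length
decreasing_by
  · simp only [List.length_drop, List.length_cons]
    omega
  · simp
  · simp

theorem pvHeadD_drop (s : List Char) (m : Nat) : (s.drop m).headD ' ' = s.getD m ' ' := by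
  simp [List.head?_drop, List.getD_eq_getElem?_getD]

theorem pvFindGt_bounds {f : Nat} {s : List Char} {i j : Nat} (h : pvFindGt f s i = some j) :
    i ≤ j ∧ j < s.length := by
  induction f generalizing i with
  | zero => simp [pvFindGt] at h
  | succ f ih =>
      rw [pvFindGt] at h
      by_cases hi : i < s.length
      · rw [if_pos hi] at h
        by_cases hgt : s.getD i ' ' = '>'
        · rw [if_pos hgt] at h
          simp at h
          omega
        · rw [if_neg hgt] at h
          have := ih h
          omega
      · rw [if_neg hi] at h
        exact absurd h (by simp)

-- the found index is the FIRST '>' at or after i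
theorem pvFindGt_first {f : Nat} {s : List Char} {i j : Nat} (h : pvFindGt f s i = some j) :
    s.getD j ' ' = '>' ∧ ∀ m, i ≤ m → m < j → s.getD m ' ' ≠ '>' := by
  induction f generalizing i with
  | zero => simp [pvFindGt] at h
  | succ f ih =>
      rw [pvFindGt] at h
      by_cases hi : i < s.length
      · rw [if_pos hi] at h
        by_cases hgt : s.getD i ' ' = '>'
        · rw [if_pos hgt] at h
          simp at h
          subst h
          exact ⟨hgt, fun m h1 h2 => by omega⟩
        · rw [if_neg hgt] at h
          obtain ⟨h1, h2⟩ := ih h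
          refine ⟨h1, fun m hm1 hm2 => ?_⟩
          rcases Nat.eq_or_lt_of_le hm1 with rfl | hlt
          · exact hgt
          · exact h2 m hlt hm2
      · rw [if_neg hi] at h
        exact absurd h (by simp)

theorem pvFindGt_fuel (f : Nat) : ∀ (g : Nat) (s : List Char) (i : Nat),
    s.length - i ≤ f → s.length - i ≤ g → pvFindGt f s i = pvFindGt g s i := by
  induction f with
  | zero =>
      intro g s i h1 h2
      cases g with
      | zero => rfl
      | succ g => rw [pvFindGt, pvFindGt, if_neg (by omega)]
  | succ f ih =>
      intro g s i h1 h2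
      cases g with
      | zero => rw [pvFindGt, pvFindGt, if_neg (by omega)]
      | succ g =>
          rw [pvFindGt, pvFindGt]
          by_cases hi : i < s.length
          · rw [if_pos hi, if_pos hi]
            by_cases hgt : s.getD i ' ' = '>'
            · rw [if_pos hgt, if_pos hgt]
            · rw [if_neg hgt, if_neg hgt, ih g s (i + 1) (by omega) (by omega)]
          · rw [if_neg hi, if_neg hi]

theorem pvFindGt_nil (f : Nat) (i : Nat) : pvFindGt f [] i = none := by
  cases f <;> simp [pvFindGt]

theorem pvFindGt_cons_succ (f : Nat) (c : Char) (t : List Char) (i : Nat) :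
    pvFindGt f (c :: t) (i + 1) = (pvFindGt f t i).map (· + 1) := by
  induction f generalizing i with
  | zero => simp [pvFindGt]
  | succ f ih =>
      rw [pvFindGt, pvFindGt]
      by_cases hi : i < t.length
      · rw [if_pos (by simp; omega), if_pos hi, List.getD_cons_succ]
        by_cases hgt : t.getD i ' ' = '>'
        · rw [if_pos hgt, if_pos hgt]
          simp
        · rw [if_neg hgt, if_neg hgt, ih]
      · rw [if_neg (by simp; omega), if_neg hi]
        simp

theorem pvFindGt_drop (f : Nat) (s : List Char) (i : Nat) :
    pvFindGt f s i = (pvFindGt f (s.drop i) 0).map (· + i) := by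
  induction i generalizing s with
  | zero =>
      simp
  | succ i ih =>
      cases s with
      | nil => simp [pvFindGt_nil]
      | cons c t =>
          rw [pvFindGt_cons_succ, ih t]
          cases h : pvFindGt f (t.drop i) 0 with
          | none => simp [List.drop_succ_cons, h]
          | some r =>
              simp [List.drop_succ_cons, h]
              all_goals omega

-- the guard of the loops, read on the suffix s.drop i
theorem pvCond_iff (s : List Char) (i : Nat) (hi : i < s.length) :
    (s.getD i ' ' = '<' ∧ i + 1 < s.length ∧ (s.getD (i + 1) ' ' = '!' ∨ s.getD (i + 1) ' ' = '@'))
      ↔ (s[i] = '<' ∧ ((s.drop (i + 1)).headD ' ' = '!' ∨ (s.drop (i + 1)).headD ' ' = '@')) := by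
  rw [pvHeadD_drop, List.getD_eq_getElem?_getD, List.getD_eq_getElem?_getD, List.getElem?_eq_getElem hi]
  constructor
  · rintro ⟨h1, _, h3⟩
    exact ⟨by simpa using h1, h3⟩
  · rintro ⟨h1, h2⟩
    refine ⟨by simpa using h1, ?_, h2⟩
    by_contra hlen
    rw [List.getElem?_eq_none (by omega)] at h2
    simp at h2

-- converting the full-string scan of the loops to the suffix scan of pvG / pvH
theorem pvFindGt_to_suffix (s : List Char) (i : Nat) :
    pvFindGt s.length s i = (pvFindGt (s.drop i).length (s.drop i) 0).map (· + i) := by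
  rw [pvFindGt_drop s.length s i,
    pvFindGt_fuel s.length (s.drop i).length (s.drop i) 0 (by simp) (by simp)]

-- pvG takes a keep-step when the guard fails or no '>' remains
theorem pvG_step_keep (s : List Char) (i : Nat) (hi : i < s.length)
    (h : ¬(s[i] = '<' ∧ ((s.drop (i + 1)).headD ' ' = '!' ∨ (s.drop (i + 1)).headD ' ' = '@'))
         ∨ pvFindGt (s.drop i).length (s.drop i) 0 = none) :
    pvG (s.drop i) = s[i] :: pvG (s.drop (i + 1)) := by
  conv_lhs => rw [List.drop_eq_getElem_cons hi, pvG]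
  rw [← List.drop_eq_getElem_cons hi]
  rcases h with h | h
  · rw [if_neg h]
  · by_cases hg : s[i] = '<' ∧ ((s.drop (i + 1)).headD ' ' = '!' ∨ (s.drop (i + 1)).headD ' ' = '@')
    · rw [if_pos hg, h]
    · rw [if_neg hg]

-- pvG takes a delete-step when the guard holds and the first '>' of the suffix is at relative index r
theorem pvG_step_del (s : List Char) (i r : Nat) (hi : i < s.length)
    (hcg : s[i] = '<' ∧ ((s.drop (i + 1)).headD ' ' = '!' ∨ (s.drop (i + 1)).headD ' ' = '@'))
    (hr : pvFindGt (s.drop i).length (s.drop i) 0 = some r) :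
    pvG (s.drop i) = (s.drop (i + r + 1)).take 1 ++ pvG (s.drop (i + r + 2)) := by
  conv_lhs => rw [List.drop_eq_getElem_cons hi, pvG]
  rw [← List.drop_eq_getElem_cons hi, if_pos hcg, hr]
  have e1 : (s.drop i).drop (r + 1) = s.drop (i + r + 1) := by
    rw [List.drop_drop]
    exact congrArg (fun m => List.drop m s) (by omega)
  simp [e1]

-- the same two step lemmas for pvH
theorem pvH_step_keep (s : List Char) (i : Nat) (hi : i < s.length)
    (h : ¬(s[i] = '<' ∧ ((s.drop (i + 1)).headD ' ' = '!' ∨ (s.drop (i + 1)).headD ' ' = '@'))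
         ∨ pvFindGt (s.drop i).length (s.drop i) 0 = none) :
    pvH (s.drop i) = s[i] :: pvH (s.drop (i + 1)) := by
  conv_lhs => rw [List.drop_eq_getElem_cons hi, pvH]
  rw [← List.drop_eq_getElem_cons hi]
  rcases h with h | h
  · rw [if_neg h]
  · by_cases hg : s[i] = '<' ∧ ((s.drop (i + 1)).headD ' ' = '!' ∨ (s.drop (i + 1)).headD ' ' = '@')
    · rw [if_pos hg, h]
    · rw [if_neg hg]

theorem pvH_step_del (s : List Char) (i r : Nat) (hi : i < s.length)
    (hcg : s[i] = '<' ∧ ((s.drop (i + 1)).headD ' ' = '!' ∨ (s.drop (i + 1)).headD ' ' = '@'))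
    (hr : pvFindGt (s.drop i).length (s.drop i) 0 = some r) :
    pvH (s.drop i) = pvH (s.drop (i + r + 1)) := by
  conv_lhs => rw [List.drop_eq_getElem_cons hi, pvH]
  rw [← List.drop_eq_getElem_cons hi, if_pos hcg, hr]
  have e1 : (s.drop i).drop (r + 1) = s.drop (i + r + 1) := by
    rw [List.drop_drop]
    exact congrArg (fun m => List.drop m s) (by omega)
  dsimp only
  rw [e1]

theorem pvCoreA_eq_pvG (n : Nat) : ∀ (s : List Char) (i : Nat), s.length - i ≤ n →
    pvCoreA n s i = s.take i ++ pvG (s.drop i) := by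
  induction n with
  | zero =>
      intro s i hn
      have h1 : s.drop i = [] := List.drop_eq_nil_of_le (by omega)
      have h2 : s.take i = s := List.take_of_length_le (by omega)
      rw [pvCoreA, h1, h2, pvG]
      simp
  | succ n ih =>
      intro s i hn
      by_cases hi : i < s.length
      · rw [pvCoreA, if_pos hi]
        have htk : s.take (i + 1) = s.take i ++ [s[i]] := by
          rw [List.take_add_one, List.getElem?_eq_getElem hi]
          rfl
        by_cases hc : s.getD i ' ' = '<' ∧ i + 1 < s.length ∧ (s.getD (i + 1) ' ' = '!' ∨ s.getD (i + 1) ' ' = '@')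
        · rw [if_pos hc]
          have hcg := (pvCond_iff s i hi).mp hc
          cases hf : pvFindGt s.length s i with
          | some j =>
              dsimp only
              have hb := pvFindGt_bounds hf
              have hrel := (pvFindGt_to_suffix s i).symm.trans hf
              obtain ⟨r, hr0, hrj⟩ : ∃ r, pvFindGt (s.drop i).length (s.drop i) 0 = some r ∧ r + i = j := by
                cases h0 : pvFindGt (s.drop i).length (s.drop i) 0 with
                | none => rw [h0] at hrel; simp at hrel
                | some r => rw [h0] at hrel; simp at hrel; exact ⟨r, rfl, hrel⟩
              set s' := s.take i ++ s.drop (j + 1) with hs'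
              have hlen' : s'.length = i + (s.length - (j + 1)) := by
                simp [hs', List.length_take, List.length_drop]
                omega
              rw [ih s' (i + 1) (by omega)]
              have htake' : s'.take (i + 1) = s.take i ++ (s.drop (j + 1)).take 1 := by
                rw [hs', List.take_append]
                congr 1
                · rw [List.take_take]; congr 1; omega
                · congr 1; rw [List.length_take]; omega
              have hdrop' : s'.drop (i + 1) = s.drop (j + 2) := by
                rw [hs', List.drop_append, List.length_take]
                have h2 : (s.take i).drop (i + 1) = [] := by
                  apply List.drop_eq_nil_of_le; rw [List.length_take]; omega
                have h3 : i + 1 - min i s.length = 1 := by omega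
                rw [h2, h3, List.drop_drop]
                simp
              rw [htake', hdrop', pvG_step_del s i r hi hcg hr0]
              have e1 : i + r + 1 = j + 1 := by omega
              have e2 : i + r + 2 = j + 2 := by omega
              rw [e1, e2, List.append_assoc]
          | none =>
              dsimp only
              have hrel := (pvFindGt_to_suffix s i).symm.trans hf
              have hf0 : pvFindGt (s.drop i).length (s.drop i) 0 = none := by
                cases h0 : pvFindGt (s.drop i).length (s.drop i) 0
                · rfl
                · rw [h0] at hrel; simp at hrel
              rw [ih s (i + 1) (by omega), pvG_step_keep s i hi (Or.inr hf0)]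
              rw [htk, List.append_assoc]
              rfl
        · rw [if_neg hc]
          rw [ih s (i + 1) (by omega),
            pvG_step_keep s i hi (Or.inl (fun hcg => hc ((pvCond_iff s i hi).mpr hcg)))]
          rw [htk, List.append_assoc]
          rfl
      · have h1 : s.drop i = [] := List.drop_eq_nil_of_le (by omega)
        have h2 : s.take i = s := List.take_of_length_le (by omega)
        rw [pvCoreA, if_neg hi, h1, h2, pvG]
        simp

theorem pvG_nil : pvG [] = [] := by rw [pvG]
theorem pvH_nil : pvH [] = [] := by rw [pvH]

theorem pvFindLt_first {f : Nat} {s : List Char} {i j : Nat} (h : pvFindLt f s i = some j) :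
    (i ≤ j ∧ j < s.length) ∧ s.getD j ' ' = '<' ∧ ∀ m, i ≤ m → m < j → s.getD m ' ' ≠ '<' := by
  induction f generalizing i with
  | zero => simp [pvFindLt] at h
  | succ f ih =>
      rw [pvFindLt] at h
      by_cases hi : i < s.length
      · rw [if_pos hi] at h
        by_cases hlt : s.getD i ' ' = '<'
        · rw [if_pos hlt] at h
          simp at h
          subst h
          exact ⟨⟨le_refl _, hi⟩, hlt, fun m h1 h2 => by omega⟩
        · rw [if_neg hlt] at h
          obtain ⟨h1, h2, h3⟩ := ih h
          refine ⟨⟨by omega, h1.2⟩, h2, fun m hm1 hm2 => ?_⟩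
          rcases Nat.eq_or_lt_of_le hm1 with rfl | hl
          · exact hlt
          · exact h3 m hl hm2
      · rw [if_neg hi] at h
        exact absurd h (by simp)

theorem pvFindLt_none {f : Nat} {s : List Char} {i : Nat} (h : pvFindLt f s i = none)
    (hf : s.length - i ≤ f) : ∀ m, i ≤ m → m < s.length → s.getD m ' ' ≠ '<' := by
  induction f generalizing i with
  | zero => intro m h1 h2; omega
  | succ f ih =>
      rw [pvFindLt] at h
      by_cases hi : i < s.length
      · rw [if_pos hi] at h
        by_cases hlt : s.getD i ' ' = '<'
        · rw [if_pos hlt] at h; exact absurd h (by simp)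
        · rw [if_neg hlt] at h
          intro m h1 h2
          rcases Nat.eq_or_lt_of_le h1 with rfl | hl
          · exact hlt
          · exact ih h (by omega) m hl h2
      · intro m h1 h2; omega

-- pvH copies a '<'-free stretch verbatim
theorem pvH_copy (d : Nat) : ∀ (s : List Char) (i j : Nat), j - i = d → i ≤ j → j ≤ s.length →
    (∀ m, i ≤ m → m < j → s.getD m ' ' ≠ '<') →
    pvH (s.drop i) = (s.drop i).take (j - i) ++ pvH (s.drop j) := by
  induction d with
  | zero =>
      intro s i j hd hij hj hfree
      have : i = j := by omega
      subst this
      simp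
  | succ d ih =>
      intro s i j hd hij hj hfree
      have hi : i < s.length := by omega
      have hkeep := pvH_step_keep s i hi (Or.inl (by
        rintro ⟨h1, -⟩
        exact hfree i (le_refl _) (by omega) (by rw [List.getD_eq_getElem s ' ' hi]; exact h1)))
      rw [hkeep, ih s (i + 1) j (by omega) (by omega) hj
        (fun m h1 h2 => hfree m (by omega) h2)]
      have ht : (s.drop i).take (j - i) = s[i] :: (s.drop (i + 1)).take (j - (i + 1)) := by
        rw [List.drop_eq_getElem_cons hi]
        have e : j - i = (j - (i + 1)) + 1 := by omega
        rw [e, List.take_succ_cons]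
      rw [ht]
      rfl

-- pvH is the identity on a '<'-free suffix
theorem pvH_nolt (d : Nat) : ∀ (s : List Char) (i : Nat), s.length - i ≤ d →
    (∀ m, i ≤ m → m < s.length → s.getD m ' ' ≠ '<') → pvH (s.drop i) = s.drop i := by
  induction d with
  | zero =>
      intro s i hd hfree
      rw [List.drop_eq_nil_of_le (by omega), pvH_nil]
  | succ d ih =>
      intro s i hd hfree
      by_cases hi : i < s.length
      · have hkeep := pvH_step_keep s i hi (Or.inl (by
          rintro ⟨h1, -⟩
          exact hfree i (le_refl _) hi (by rw [List.getD_eq_getElem s ' ' hi]; exact h1)))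
        rw [hkeep, ih s (i + 1) (by omega) (fun m h1 h2 => hfree m (by omega) h2),
          ← List.drop_eq_getElem_cons hi]
      · rw [List.drop_eq_nil_of_le (by omega)]
        exact pvH_nil

theorem pvCoreB_eq_pvH (n : Nat) : ∀ (s : List Char) (i : Nat) (out : List Char), s.length - i ≤ n →
    pvCoreB n s i out = out ++ pvH (s.drop i) := by
  induction n with
  | zero =>
      intro s i out hn
      have h1 : s.drop i = [] := List.drop_eq_nil_of_le (by omega)
      rw [pvCoreB, h1, pvH_nil]
      simp
  | succ n ih =>
      intro s i out hn
      by_cases hi : i < s.length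
      · rw [pvCoreB, if_pos hi]
        cases hfl : pvFindLt s.length s i with
        | none =>
            dsimp only
            rw [pvH_nolt s.length s i (by omega)
              (pvFindLt_none hfl (by omega))]
        | some j =>
            dsimp only
            obtain ⟨⟨hij, hjlen⟩, hjlt, hjfree⟩ := pvFindLt_first hfl
            have hcopy := pvH_copy (j - i) s i j rfl hij (by omega) hjfree
            by_cases hc : j + 1 < s.length ∧ (s.getD (j + 1) ' ' = '!' ∨ s.getD (j + 1) ' ' = '@')
            · rw [if_pos hc]
              have hcond : s.getD j ' ' = '<' ∧ j + 1 < s.length ∧ (s.getD (j + 1) ' ' = '!' ∨ s.getD (j + 1) ' ' = '@') :=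
                ⟨hjlt, hc⟩
              have hcg := (pvCond_iff s j hjlen).mp hcond
              cases hf : pvFindGt s.length s j with
              | some k =>
                  dsimp only
                  have hb := pvFindGt_bounds hf
                  have hrel := (pvFindGt_to_suffix s j).symm.trans hf
                  obtain ⟨r, hr0, hrj⟩ : ∃ r, pvFindGt (s.drop j).length (s.drop j) 0 = some r ∧ r + j = k := by
                    cases h0 : pvFindGt (s.drop j).length (s.drop j) 0 with
                    | none => rw [h0] at hrel; simp at hrel
                    | some r => rw [h0] at hrel; simp at hrel; exact ⟨r, rfl, hrel⟩
                  rw [ih s (k + 1) _ (by omega), hcopy, pvH_step_del s j r hjlen hcg hr0]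
                  have e : j + r + 1 = k + 1 := by omega
                  rw [e, List.append_assoc]
              | none =>
                  dsimp only
                  have hrel := (pvFindGt_to_suffix s j).symm.trans hf
                  have hf0 : pvFindGt (s.drop j).length (s.drop j) 0 = none := by
                    cases h0 : pvFindGt (s.drop j).length (s.drop j) 0
                    · rfl
                    · rw [h0] at hrel; simp at hrel
                  rw [ih s (j + 1) _ (by omega), hcopy,
                    pvH_step_keep s j hjlen (Or.inr hf0)]
                  have ht : (s.drop i).take (j + 1 - i) = (s.drop i).take (j - i) ++ [s[j]] := by
                    have e : j + 1 - i = (j - i) + 1 := by omega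
                    rw [e, List.take_add_one]
                    congr 1
                    have : (s.drop i)[j - i]? = s[j]? := by
                      rw [List.getElem?_drop]
                      congr 1
                      omega
                    rw [this, List.getElem?_eq_getElem hjlen]
                    rfl
                  rw [ht]
                  simp
            · rw [if_neg hc]
              have hnc : ¬ (s[j] = '<' ∧ ((s.drop (j + 1)).headD ' ' = '!' ∨ (s.drop (j + 1)).headD ' ' = '@')) := by
                intro hcg
                exact hc ((pvCond_iff s j hjlen).mpr hcg).2
              rw [ih s (j + 1) _ (by omega), hcopy,
                pvH_step_keep s j hjlen (Or.inl hnc)]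
              have ht : (s.drop i).take (j + 1 - i) = (s.drop i).take (j - i) ++ [s[j]] := by
                have e : j + 1 - i = (j - i) + 1 := by omega
                rw [e, List.take_add_one]
                congr 1
                have : (s.drop i)[j - i]? = s[j]? := by
                  rw [List.getElem?_drop]
                  congr 1
                  omega
                rw [this, List.getElem?_eq_getElem hjlen]
                rfl
              rw [ht]
              simp
      · have h1 : s.drop i = [] := List.drop_eq_nil_of_le (by omega)
        rw [pvCoreB, if_neg hi, h1, pvH_nil]
        simp

-- ---- pattern lemmas ----
theorem pvHasPat_tail {c : Char} {t : List Char} (h : pvHasPat (c :: t) = false) :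
    pvHasPat t = false := by
  rw [pvHasPat] at h
  exact (Bool.or_eq_false_iff.mp h).2

theorem pvHeadD_getD (l : List Char) : l.headD ' ' = l.getD 0 ' ' := by cases l <;> rfl

theorem pvHasPat_drop {s : List Char} (m : Nat) (h : pvHasPat s = false) :
    pvHasPat (s.drop m) = false := by
  induction m generalizing s with
  | zero => simpa using h
  | succ m ih =>
      cases s with
      | nil => simpa using h
      | cons c t => exact ih (pvHasPat_tail h)

theorem pvGetD_drop (s : List Char) (a m : Nat) : (s.drop a).getD m ' ' = s.getD (a + m) ' ' := by
  simp [List.getD_eq_getElem?_getD, List.getElem?_drop]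

theorem pvMem_of_getD {s : List Char} {j : Nat} (hj : j < s.length) (h : s.getD j ' ' = '>') :
    '>' ∈ s := by
  rw [List.getD_eq_getElem s ' ' hj] at h
  exact h ▸ List.getElem_mem hj

theorem pvAfterGt_true (l : List Char) : ∀ (j : Nat), j < l.length → l.getD j ' ' = '>' →
    (∀ m, m < j → l.getD m ' ' ≠ '>') → l.getD (j + 1) ' ' = '<' →
    (l.getD (j + 2) ' ' = '!' ∨ l.getD (j + 2) ' ' = '@') → (l.drop (j + 1)).contains '>' = true →
    pvAfterGt l = true := by
  induction l with
  | nil => intro j hj; simp at hj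
  | cons c t ih =>
      intro j hj hgt hfirst h1 h2 h3
      cases j with
      | zero =>
          rw [List.getD_cons_zero] at hgt
          rw [pvAfterGt, if_pos hgt]
          simp only [List.getD_cons_succ] at h1 h2
          have e1 : t.headD ' ' = '<' := by rw [pvHeadD_getD]; exact h1
          have e2 : (t.drop 1).headD ' ' = t.getD 1 ' ' := pvHeadD_drop t 1
          have h3' : t.contains '>' = true := by simpa using h3
          rw [e1, e2, h3']
          rcases h2 with h2 | h2 <;> rw [h2] <;> decide
      | succ j =>
          have hc : c ≠ '>' := by
            have := hfirst 0 (by omega)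
            simpa using this
          rw [pvAfterGt, if_neg hc]
          exact ih j (by simpa using hj) (by simpa using hgt)
            (fun m hm => by
              have := hfirst (m + 1) (by omega)
              simpa using this)
            (by simpa using h1) (by simpa using h2) (by simpa using h3)

-- main bridge: on pattern-free texts, A's suffix semantics equals B's
theorem pvG_eq_pvH (s : List Char) (hP : pvHasPat s = false) : pvG s = pvH s := by
  induction hn : s.length using Nat.strong_induction_on generalizing s with
  | _ n ihn =>
  cases s with
  | nil => rw [pvG_nil, pvH_nil]
  | cons c rest =>
    set s := c :: rest with hs
    have hi : 0 < s.length := by simp [hs]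
    have h0 : s.drop 0 = s := rfl
    have h1 : s.drop 1 = rest := rfl
    have hPrest : pvHasPat rest = false := pvHasPat_tail hP
    by_cases hg : s[0] = '<' ∧ ((s.drop 1).headD ' ' = '!' ∨ (s.drop 1).headD ' ' = '@')
    · cases hf : pvFindGt (s.drop 0).length (s.drop 0) 0 with
      | none =>
          have hG := pvG_step_keep s 0 hi (Or.inr hf)
          have hH := pvH_step_keep s 0 hi (Or.inr hf)
          rw [h0] at hG hH
          rw [hG, hH, h1,
            ihn rest.length (by simp [hs] at hn; omega) rest hPrest rfl]
      | some r =>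
          have hG := pvG_step_del s 0 r hi hg hf
          have hH := pvH_step_del s 0 r hi hg hf
          rw [h0] at hG hH
          simp only [Nat.zero_add] at hG hH
          rw [hG, hH]
          rw [h0] at hf
          obtain ⟨hr_gt, hr_first⟩ := pvFindGt_first hf
          have hrb := pvFindGt_bounds hf
          have hr1 : 1 ≤ r := by
            rcases Nat.eq_zero_or_pos r with rfl | h
            · have hc0 : s.getD 0 ' ' = '<' := by
                rw [List.getD_eq_getElem s ' ' hi]; exact hg.1
              rw [hc0] at hr_gt
              exact absurd hr_gt (by decide)
            · exact h
          cases hx : s.drop (r + 1) with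
          | nil =>
              have hu2 : s.drop (r + 2) = [] := by
                have : s.drop (r + 2) = (s.drop (r + 1)).drop 1 := by
                  rw [List.drop_drop]
                rw [this, hx]
                rfl
              rw [hu2, pvG_nil, pvH_nil]
              rfl
          | cons x u =>
              have hrlen : r + 1 < s.length := by
                by_contra hle
                rw [List.drop_eq_nil_of_le (by omega)] at hx
                exact absurd hx (by simp)
              have hu : s.drop (r + 2) = u := by
                have : s.drop (r + 2) = (s.drop (r + 1)).drop 1 := by
                  rw [List.drop_drop]
                rw [this, hx]
                rfl
              -- B cannot fire a delete-step at x :: u: that would be the forbidden pattern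
              have hnotdel : ¬ (x = '<' ∧ (u.headD ' ' = '!' ∨ u.headD ' ' = '@')
                  ∧ (x :: u).contains '>' = true) := by
                rintro ⟨hx1, hx2, hx3⟩
                have hag : pvAfterGt rest = true := by
                  rw [← h1]
                  apply pvAfterGt_true (s.drop 1) (r - 1)
                  · rw [List.length_drop]; omega
                  · rw [pvGetD_drop]
                    have e : 1 + (r - 1) = r := by omega
                    rw [e]; exact hr_gt
                  · intro m hm
                    rw [pvGetD_drop]
                    exact hr_first (1 + m) (by omega) (by omega)
                  · rw [pvGetD_drop]
                    have e : 1 + (r - 1 + 1) = r + 1 := by omega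
                    rw [e, ← pvHeadD_drop s (r + 1), hx]
                    exact hx1
                  · rw [pvGetD_drop]
                    have e : 1 + (r - 1 + 2) = r + 2 := by omega
                    rw [e, ← pvHeadD_drop s (r + 2), hu]
                    exact hx2
                  · have e : (s.drop 1).drop (r - 1 + 1) = s.drop (r + 1) := by
                      rw [List.drop_drop]; congr 1; omega
                    rw [e, hx]; exact hx3
                have hph : pvHasPat s = true := by
                  have hc0 : c = '<' := by simpa [hs] using hg.1
                  have hh : rest.headD ' ' = '!' ∨ rest.headD ' ' = '@' := by
                    have := hg.2
                    rw [h1] at this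
                    exact this
                  rw [hs, pvHasPat, hc0, hag]
                  rcases hh with h | h <;> rw [h] <;> simp
                exact absurd hph (by simp [hP])
              have hPu : pvHasPat u = false := by
                have := pvHasPat_drop (r + 2) hP
                rwa [hu] at this
              have hlenu : u.length < n := by
                have hlx : (x :: u).length = s.length - (r + 1) := by
                  rw [← hx]; simp
                simp at hlx
                omega
              have hrecur := ihn u.length hlenu u hPu rfl
              -- B keeps x and both sides recurse on u
              have hHxu : pvH (x :: u) = x :: pvH u := by
                have hix : 0 < (x :: u).length := by simp
                have hx0 : (x :: u).drop 0 = x :: u := rfl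
                have hx01 : (x :: u).drop 1 = u := rfl
                by_cases hgx : (x :: u)[0] = '<' ∧ (((x :: u).drop 1).headD ' ' = '!' ∨ ((x :: u).drop 1).headD ' ' = '@')
                · cases hfx : pvFindGt ((x :: u).drop 0).length ((x :: u).drop 0) 0 with
                  | none =>
                      have hH := pvH_step_keep (x :: u) 0 hix (Or.inr hfx)
                      rw [hx0] at hH
                      rw [hH]
                      rfl
                  | some q =>
                      exfalso
                      rw [hx0] at hfx
                      obtain ⟨hq_gt, _⟩ := pvFindGt_first hfx
                      have hqb := pvFindGt_bounds hfx
                      refine hnotdel ⟨by simpa using hgx.1, by simpa [hx01] using hgx.2, ?_⟩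
                      have := pvMem_of_getD (s := x :: u) hqb.2 hq_gt
                      simpa using this
                · have hfx : pvFindGt ((x :: u).drop 0).length ((x :: u).drop 0) 0 = pvFindGt (x :: u).length (x :: u) 0 := by rw [hx0]
                  have hH := pvH_step_keep (x :: u) 0 hix (Or.inl hgx)
                  rw [hx0] at hH
                  rw [hH]
                  rfl
              rw [hu, hHxu, hrecur]
              rfl
    · have hG := pvG_step_keep s 0 hi (Or.inl hg)
      have hH := pvH_step_keep s 0 hi (Or.inl hg)
      rw [h0] at hG hH
      rw [hG, hH, h1,
        ihn rest.length (by simp [hs] at hn; omega) rest hPrest rfl]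

-- ---- tightness: inside D_, A's pre-squash output keeps strictly more '<' than B's ----

theorem pvFindGt_none_all {f : Nat} {s : List Char} {i : Nat} (h : pvFindGt f s i = none)
    (hf : s.length - i ≤ f) : ∀ m, i ≤ m → m < s.length → s.getD m ' ' ≠ '>' := by
  induction f generalizing i with
  | zero => intro m h1 h2; omega
  | succ f ih =>
      rw [pvFindGt] at h
      by_cases hi : i < s.length
      · rw [if_pos hi] at h
        by_cases hgt : s.getD i ' ' = '>'
        · rw [if_pos hgt] at h; exact absurd h (by simp)
        · rw [if_neg hgt] at h
          intro m h1 h2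
          rcases Nat.eq_or_lt_of_le h1 with rfl | hl
          · exact hgt
          · exact ih h (by omega) m hl h2
      · intro m h1 h2; omega

theorem pvFfg_some_of_mem {t : List Char} (h : '>' ∈ t) :
    ∃ g, pvFindGt t.length t 0 = some g := by
  cases hf : pvFindGt t.length t 0 with
  | some g => exact ⟨g, rfl⟩
  | none =>
      exfalso
      obtain ⟨i, hi, hie⟩ := List.getElem_of_mem h
      exact pvFindGt_none_all hf (by omega) i (by omega) hi
        (by rw [List.getD_eq_getElem t ' ' hi]; exact hie)

theorem pvFfg_cons {c : Char} {t : List Char} {g : Nat} (hc : c ≠ '>')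
    (h : pvFindGt (c :: t).length (c :: t) 0 = some g) :
    1 ≤ g ∧ pvFindGt t.length t 0 = some (g - 1) := by
  rw [List.length_cons, pvFindGt, if_pos (by simp), if_neg (by simpa using hc),
    pvFindGt_cons_succ] at h
  cases h0 : pvFindGt t.length t 0 with
  | none => rw [h0] at h; simp at h
  | some r =>
      rw [h0] at h
      simp at h
      constructor
      · omega
      · congr 1
        omega

theorem pvFfg_head {t : List Char} {g : Nat} (h : pvFindGt t.length t 0 = some g)
    (hc : t.headD ' ' = '>') : g = 0 := by
  by_contra hg
  obtain ⟨-, hfirst⟩ := pvFindGt_first h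
  exact hfirst 0 (by omega) (by omega) (by rw [← pvHeadD_getD]; exact hc)

theorem pvAfterGt_mem {l : List Char} (h : pvAfterGt l = true) : '>' ∈ l := by
  induction l with
  | nil => simp [pvAfterGt] at h
  | cons c t ih =>
      rw [pvAfterGt] at h
      by_cases hc : c = '>'
      · rw [hc]; exact List.mem_cons_self
      · rw [if_neg hc] at h
        exact List.mem_cons_of_mem c (ih h)

theorem pvAfterGt_elim (l : List Char) : ∀ (j : Nat), j < l.length → l.getD j ' ' = '>' →
    (∀ m, m < j → l.getD m ' ' ≠ '>') → pvAfterGt l = true →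
    (l.drop (j + 1)).headD ' ' = '<' ∧
      ((l.drop (j + 2)).headD ' ' = '!' ∨ (l.drop (j + 2)).headD ' ' = '@') ∧
      '>' ∈ l.drop (j + 1) := by
  induction l with
  | nil => intro j hj; simp at hj
  | cons c t ih =>
      intro j hj hgt hfirst hag
      cases j with
      | zero =>
          rw [List.getD_cons_zero] at hgt
          rw [pvAfterGt, if_pos hgt] at hag
          simp only [Bool.and_eq_true, decide_eq_true_eq, Bool.or_eq_true] at hag
          obtain ⟨⟨h1, h2⟩, h3⟩ := hag
          refine ⟨h1, ?_, by simpa using h3⟩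
          have e : (c :: t).drop 2 = t.drop 1 := rfl
          rw [e]
          exact h2
      | succ j =>
          have hc : c ≠ '>' := by
            have := hfirst 0 (by omega)
            simpa using this
          rw [pvAfterGt, if_neg hc] at hag
          have := ih j (by simpa using hj) (by simpa using hgt)
            (fun m hm => by
              have := hfirst (m + 1) (by omega)
              simpa using this) hag
          exact this

-- Lemma E: a pattern occurrence survives past the first '>' (either the suffix right after it
-- opens a deletable mention, or the pattern lies wholly behind it)
theorem pvPat_after (t : List Char) : ∀ (g : Nat), pvFindGt t.length t 0 = some g →
    pvHasPat t = true →
    ((t.drop (g + 1)).headD ' ' = '<' ∧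
      (((t.drop (g + 1)).drop 1).headD ' ' = '!' ∨ ((t.drop (g + 1)).drop 1).headD ' ' = '@') ∧
      '>' ∈ t.drop (g + 1))
    ∨ pvHasPat (t.drop (g + 1)) = true := by
  induction t with
  | nil => intro g hg; rw [pvFindGt_nil] at hg; exact absurd hg (by simp)
  | cons c t' ih =>
      intro g hg hP
      rw [pvHasPat] at hP
      simp only [Bool.or_eq_true] at hP
      rcases hP with hhere | htail
      · simp only [Bool.and_eq_true, decide_eq_true_eq, Bool.or_eq_true] at hhere
        obtain ⟨⟨hc, -⟩, hag⟩ := hhere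
        have hcne : c ≠ '>' := by rw [hc]; decide
        obtain ⟨hg1, hg'⟩ := pvFfg_cons hcne hg
        have hb := (pvFindGt_bounds hg').2
        have hfst := pvFindGt_first hg'
        obtain ⟨e1, e2, e3⟩ := pvAfterGt_elim t' (g - 1) hb hfst.1
          (fun m hm => hfst.2 m (by omega) hm) hag
        left
        have d1 : (c :: t').drop (g + 1) = t'.drop (g - 1 + 1) := by
          rw [List.drop_succ_cons]
          congr 1
          omega
        rw [d1]
        have d2' : (t'.drop (g - 1 + 1)).drop 1 = t'.drop (g - 1 + 2) := by
          have e12 : g - 1 + 1 + 1 = g - 1 + 2 := by omega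
          rw [List.drop_drop, e12]
        rw [d2']
        exact ⟨e1, e2, e3⟩
      · by_cases hc : c = '>'
        · have hg0 : g = 0 := pvFfg_head hg (by rw [List.headD_cons]; exact hc)
          right
          rw [hg0]
          exact htail
        · obtain ⟨hg1, hg'⟩ := pvFfg_cons hc hg
          have := ih (g - 1) hg' htail
          have d1 : (c :: t').drop (g + 1) = t'.drop (g - 1 + 1) := by
            rw [List.drop_succ_cons]
            congr 1
            omega
          rw [d1]
          exact this

-- the count of '<' kept by pvH is at most that kept by pvG …
theorem pvCount_le (n : Nat) : ∀ (t : List Char), t.length ≤ n →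
    ((pvH t).count '<' ≤ (pvG t).count '<') ∧
    (∀ g, pvFindGt t.length t 0 = some g →
      (pvH (t.drop (g + 1))).count '<' ≤ (pvG t).count '<') := by
  induction n with
  | zero =>
      intro t ht
      have : t = [] := List.eq_nil_of_length_eq_zero (by omega)
      subst this
      refine ⟨by rw [pvG_nil, pvH_nil], fun g hg => ?_⟩
      rw [pvFindGt_nil] at hg
      exact absurd hg (by simp)
  | succ n ih =>
      intro t ht
      cases t with
      | nil =>
          refine ⟨by rw [pvG_nil, pvH_nil], fun g hg => ?_⟩
          rw [pvFindGt_nil] at hg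
          exact absurd hg (by simp)
      | cons c rest =>
      set t := c :: rest with hts
      have hi : 0 < t.length := by simp [hts]
      by_cases hgd : t[0] = '<' ∧ ((t.drop 1).headD ' ' = '!' ∨ (t.drop 1).headD ' ' = '@')
      · cases hf : pvFindGt t.length t 0 with
        | none =>
            have hG := pvG_step_keep t 0 hi (Or.inr hf)
            have hH := pvH_step_keep t 0 hi (Or.inr hf)
            simp only [List.drop_zero, Nat.zero_add] at hG hH
            have edrop1 : t.drop 1 = rest := rfl
            rw [edrop1] at hG hH
            have hrest := (ih rest (by simp [hts] at ht; omega)).1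
            refine ⟨?_, fun g hg => by exact absurd hg (by simp)⟩
            rw [hG, hH]
            simp only [List.count_cons]
            omega
        | some g =>
            have hG := pvG_step_del t 0 g hi hgd hf
            have hH := pvH_step_del t 0 g hi hgd hf
            simp only [List.drop_zero, Nat.zero_add] at hG hH
            -- the shared inner bound: count (pvH w) ≤ count (take 1 w) + count (pvG (w.drop 1))
            have hb := pvFindGt_bounds hf
            have hinner : (pvH (t.drop (g + 1))).count '<' ≤
                ((t.drop (g + 1)).take 1).count '<' + (pvG (t.drop (g + 2))).count '<' := by
              cases hw : t.drop (g + 1) with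
              | nil => rw [pvH_nil]; simp
              | cons h w1 =>
                  have hw1 : t.drop (g + 2) = w1 := by
                    have : t.drop (g + 2) = (t.drop (g + 1)).drop 1 := by rw [List.drop_drop]
                    rw [this, hw]
                    rfl
                  have hwlen : w1.length ≤ n := by
                    have : (h :: w1).length = t.length - (g + 1) := by rw [← hw]; simp
                    have hlen2 : t.length = rest.length + 1 := by rw [hts]; rfl
                    simp at this
                    simp [hts] at ht
                    omega
                  by_cases hdel : (h :: w1)[0] = '<' ∧
                      (((h :: w1).drop 1).headD ' ' = '!' ∨ ((h :: w1).drop 1).headD ' ' = '@') ∧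
                      ∃ q, pvFindGt (h :: w1).length (h :: w1) 0 = some q
                  · obtain ⟨hw0, hw2, q, hq⟩ := hdel
                    have hHw := pvH_step_del (h :: w1) 0 q (by simp) ⟨hw0, hw2⟩ hq
                    simp only [List.drop_zero, Nat.zero_add] at hHw
                    have hne : h ≠ '>' := by simp at hw0; rw [hw0]; decide
                    obtain ⟨hq1, hq'⟩ := pvFfg_cons hne hq
                    have hdq : (h :: w1).drop (q + 1) = w1.drop (q - 1 + 1) := by
                      rw [List.drop_succ_cons]
                      congr 1
                      omega
                    have := (ih w1 hwlen).2 (q - 1) hq'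
                    rw [hw1, hHw, hdq]
                    calc (pvH (w1.drop (q - 1 + 1))).count '<' ≤ (pvG w1).count '<' := this
                      _ ≤ ((h :: w1).take 1).count '<' + (pvG w1).count '<' := by omega
                  · have hkp : ¬((h :: w1)[0] = '<' ∧
                        (((h :: w1).drop 1).headD ' ' = '!' ∨ ((h :: w1).drop 1).headD ' ' = '@'))
                        ∨ pvFindGt (h :: w1).length (h :: w1) 0 = none := by
                      by_cases h1 : (h :: w1)[0] = '<' ∧
                          (((h :: w1).drop 1).headD ' ' = '!' ∨ ((h :: w1).drop 1).headD ' ' = '@')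
                      · right
                        cases h2 : pvFindGt (h :: w1).length (h :: w1) 0 with
                        | none => rfl
                        | some q => exact absurd ⟨h1.1, h1.2, q, h2⟩ hdel
                      · left; exact h1
                    have hHw := pvH_step_keep (h :: w1) 0 (by simp) hkp
                    simp only [List.drop_zero, Nat.zero_add] at hHw
                    have := (ih w1 hwlen).1
                    rw [hw1, hHw]
                    simp only [List.getElem_cons_zero, List.count_cons, List.take_succ_cons,
                      List.take_zero, List.count_nil]
                    have e : (h :: w1).drop 1 = w1 := rfl
                    rw [e]
                    omega
            constructor
            · rw [hG, hH, List.count_append]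
              exact hinner
            · intro g' hg'
              have : g' = g := by simpa using hg'.symm
              subst this
              rw [hG, List.count_append]
              exact hinner
      · have hG := pvG_step_keep t 0 hi (Or.inl hgd)
        have hH := pvH_step_keep t 0 hi (Or.inl hgd)
        simp only [List.drop_zero, Nat.zero_add] at hG hH
        have edrop1 : t.drop 1 = rest := rfl
        rw [edrop1] at hG hH
        have hrestlen : rest.length ≤ n := by simp [hts] at ht; omega
        have hrest := (ih rest hrestlen).1
        constructor
        · rw [hG, hH]
          simp only [List.count_cons]
          omega
        · intro g hg
          rw [hG]
          by_cases hc : c = '>'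
          · have hg0 : g = 0 := pvFfg_head hg (by rw [hts, List.headD_cons]; exact hc)
            subst hg0
            have e : t.drop 1 = rest := rfl
            rw [e]
            simp only [List.count_cons]
            omega
          · obtain ⟨hg1, hg'⟩ := pvFfg_cons (t := rest) hc (by rw [← hts]; exact hg)
            have := (ih rest hrestlen).2 (g - 1) hg'
            have d1 : t.drop (g + 1) = rest.drop (g - 1 + 1) := by
              rw [hts, List.drop_succ_cons]
              congr 1
              omega
            rw [d1]
            simp only [List.count_cons]
            omega

-- … and strictly fewer as soon as the text contains the pattern
theorem pvCount_lt (n : Nat) : ∀ (t : List Char), t.length ≤ n → pvHasPat t = true →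
    (pvH t).count '<' < (pvG t).count '<' := by
  induction n with
  | zero =>
      intro t ht hP
      have : t = [] := List.eq_nil_of_length_eq_zero (by omega)
      subst this
      simp [pvHasPat] at hP
  | succ n ih =>
      intro t ht hP
      cases t with
      | nil => simp [pvHasPat] at hP
      | cons c rest =>
      set t := c :: rest with hts
      have hi : 0 < t.length := by simp [hts]
      have hrestlen : rest.length ≤ n := by simp [hts] at ht; omega
      by_cases hgd : t[0] = '<' ∧ ((t.drop 1).headD ' ' = '!' ∨ (t.drop 1).headD ' ' = '@')
      · cases hf : pvFindGt t.length t 0 with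
        | none =>
            -- the guard holds but no '>' remains: the pattern must lie in the tail
            have hG := pvG_step_keep t 0 hi (Or.inr hf)
            have hH := pvH_step_keep t 0 hi (Or.inr hf)
            simp only [List.drop_zero, Nat.zero_add] at hG hH
            have edrop1 : t.drop 1 = rest := rfl
            rw [edrop1] at hG hH
            have htail : pvHasPat rest = true := by
              rw [hts, pvHasPat] at hP
              simp only [Bool.or_eq_true] at hP
              rcases hP with hhere | htail
              · exfalso
                simp only [Bool.and_eq_true] at hhere
                have hmem : '>' ∈ rest := pvAfterGt_mem hhere.2
                have hmem' : '>' ∈ t := by rw [hts]; exact List.mem_cons_of_mem c hmem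
                obtain ⟨g, hg⟩ := pvFfg_some_of_mem hmem'
                rw [hf] at hg
                exact absurd hg (by simp)
              · exact htail
            have := ih rest hrestlen htail
            rw [hG, hH]
            simp only [List.count_cons]
            omega
        | some g =>
            have hG := pvG_step_del t 0 g hi hgd hf
            have hH := pvH_step_del t 0 g hi hgd hf
            simp only [List.drop_zero, Nat.zero_add] at hG hH
            have hE := pvPat_after t g hf hP
            cases hw : t.drop (g + 1) with
            | nil =>
                exfalso
                rw [hw] at hE
                rcases hE with ⟨hd1, -, -⟩ | hPw
                · simp at hd1
                · simp [pvHasPat] at hPw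
            | cons h w1 =>
                have hw1 : t.drop (g + 2) = w1 := by
                  have : t.drop (g + 2) = (t.drop (g + 1)).drop 1 := by rw [List.drop_drop]
                  rw [this, hw]
                  rfl
                have hwlen : w1.length ≤ n := by
                  have : (h :: w1).length = t.length - (g + 1) := by rw [← hw]; simp
                  have hlen2 : t.length = rest.length + 1 := by rw [hts]; rfl
                  simp at this
                  simp [hts] at ht
                  omega
                rw [hw] at hE
                by_cases hdel : h = '<' ∧ (w1.headD ' ' = '!' ∨ w1.headD ' ' = '@') ∧ '>' ∈ (h :: w1)
                · -- B deletes the second mention whose '<' A keeps unexamined: strict via that '<'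
                  obtain ⟨hh, hd2, hd3⟩ := hdel
                  obtain ⟨q, hq⟩ := pvFfg_some_of_mem hd3
                  have hHw := pvH_step_del (h :: w1) 0 q (by simp)
                    ⟨by simpa using hh, by simpa using hd2⟩ hq
                  simp only [List.drop_zero, Nat.zero_add] at hHw
                  have hne : h ≠ '>' := by rw [hh]; decide
                  obtain ⟨hq1, hq'⟩ := pvFfg_cons hne hq
                  have hdq : (h :: w1).drop (q + 1) = w1.drop (q - 1 + 1) := by
                    rw [List.drop_succ_cons]
                    congr 1
                    omega
                  have hle := (pvCount_le n w1 hwlen).2 (q - 1) hq'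
                  rw [hG, hH, hw, hw1, hHw, hdq, List.count_append]
                  have hone : ((h :: w1).take 1).count '<' = 1 := by rw [hh]; simp
                  omega
                · -- otherwise B keeps the head of the suffix and the pattern recurses into w1
                  have hPw1 : pvHasPat w1 = true := by
                    rcases hE with ⟨hd1, hd2, hd3⟩ | hPw
                    · exact absurd ⟨by simpa using hd1, by simpa using hd2, hd3⟩ hdel
                    · rw [pvHasPat] at hPw
                      simp only [Bool.or_eq_true] at hPw
                      rcases hPw with hhere | htail
                      · exfalso
                        simp only [Bool.and_eq_true, decide_eq_true_eq, Bool.or_eq_true] at hhere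
                        obtain ⟨⟨hh, hh2⟩, hag⟩ := hhere
                        exact hdel ⟨hh, by simpa using hh2,
                          List.mem_cons_of_mem h (pvAfterGt_mem hag)⟩
                      · exact htail
                  have hkp : ¬((h :: w1)[0] = '<' ∧
                      (((h :: w1).drop 1).headD ' ' = '!' ∨ ((h :: w1).drop 1).headD ' ' = '@'))
                      ∨ pvFindGt (h :: w1).length (h :: w1) 0 = none := by
                    by_cases h1 : (h :: w1)[0] = '<' ∧
                        (((h :: w1).drop 1).headD ' ' = '!' ∨ ((h :: w1).drop 1).headD ' ' = '@')
                    · right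
                      cases h2 : pvFindGt (h :: w1).length (h :: w1) 0 with
                      | none => rfl
                      | some q =>
                          exfalso
                          obtain ⟨hq_gt, -⟩ := pvFindGt_first h2
                          have hqb := pvFindGt_bounds h2
                          exact hdel ⟨by simpa using h1.1, by simpa using h1.2,
                            by simpa using pvMem_of_getD (s := h :: w1) hqb.2 hq_gt⟩
                    · left; exact h1
                  have hHw := pvH_step_keep (h :: w1) 0 (by simp) hkp
                  simp only [List.drop_zero, Nat.zero_add] at hHw
                  have := ih w1 hwlen hPw1
                  rw [hG, hH, hw, hw1, hHw, List.count_append]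
                  have e : (h :: w1).drop 1 = w1 := rfl
                  rw [e]
                  simp only [List.getElem_cons_zero, List.count_cons, List.take_succ_cons,
                    List.take_zero, List.count_nil]
                  omega
      · -- keep step: a pattern at the head would force the delete step, so it lies in the tail
        have hG := pvG_step_keep t 0 hi (Or.inl hgd)
        have hH := pvH_step_keep t 0 hi (Or.inl hgd)
        simp only [List.drop_zero, Nat.zero_add] at hG hH
        have edrop1 : t.drop 1 = rest := rfl
        rw [edrop1] at hG hH
        have htail : pvHasPat rest = true := by
          rw [hts, pvHasPat] at hP
          simp only [Bool.or_eq_true] at hP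
          rcases hP with hhere | htail
          · exfalso
            simp only [Bool.and_eq_true, decide_eq_true_eq, Bool.or_eq_true] at hhere
            obtain ⟨⟨hc, hh⟩, -⟩ := hhere
            exact hgd ⟨by simpa [hts] using hc, by simpa [hts] using hh⟩
          · exact htail
        have := ih rest hrestlen htail
        rw [hG, hH]
        simp only [List.count_cons]
        omega

-- the space-squashing replaces of both programs preserve the number of '<'
theorem pvGo_count (old new : List Char) (hold : old.count '<' = 0) (hnew : new.count '<' = 0) :
    ∀ (f : Nat) (l acc : List Char),
      (PySem.Chars.replace.go old new f l acc).count '<' = acc.count '<' + l.count '<' := by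
  intro f
  induction f with
  | zero =>
      intro l acc
      rw [PySem.Chars.replace.go]
      simp [List.count_append]
  | succ f ihf =>
      intro l acc
      cases l with
      | nil =>
          rw [PySem.Chars.replace.go]
          · simp
          · omega
      | cons c tl =>
          rw [PySem.Chars.replace.go]
          by_cases hp : old.isPrefixOf (c :: tl)
          · rw [if_pos hp]
            obtain ⟨r, hr⟩ := (List.isPrefixOf_iff_prefix.mp hp)
            rw [ihf]
            have hdrop : (c :: tl).drop old.length = r := by
              rw [← hr, List.drop_left]
            have hcount : (c :: tl).count '<' = old.count '<' + r.count '<' := by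
              rw [← hr, List.count_append]
            rw [hdrop, hcount, List.count_append, List.count_reverse]
            simp [hold, hnew]
          · rw [if_neg hp, ihf]
            simp only [List.count_cons]
            omega

theorem pvReplace_count (l old new : List Char) (hemp : old.isEmpty = false)
    (hold : old.count '<' = 0) (hnew : new.count '<' = 0) :
    (PySem.Chars.replace l old new).count '<' = l.count '<' := by
  rw [PySem.Chars.replace, hemp]
  simp only [Bool.false_eq_true, if_false]
  rw [pvGo_count old new hold hnew]
  simp

theorem pvSquash_count (x : String) :
    ((PySem.Str.replace (PySem.Str.replace x "   " " ") "  " " ").toList).count '<' =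
      x.toList.count '<' := by
  rw [PySem.Str.toList_replace, pvReplace_count _ _ _ (by decide) (by decide) (by decide),
    PySem.Str.toList_replace, pvReplace_count _ _ _ (by decide) (by decide) (by decide)]

-- ===== VERDICT (by name: the statements are the Claim_ definitions above) =====
theorem remove_mentions_spec : Claim_unchanged_remove_mentions := by
  intro text _ hD
  unfold remove_mentions remove_mentions_alt
  rw [pvCoreA_eq_pvG text.toList.length text.toList 0 (by omega),
    pvCoreB_eq_pvH text.toList.length text.toList 0 [] (by omega)]
  have hP : pvHasPat text.toList = false := by
    unfold D_remove_mentions at hD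
    simpa using hD
  simp [pvG_eq_pvH text.toList hP]

theorem remove_mentions_changed : Claim_changed_remove_mentions := by
  unfold Claim_changed_remove_mentions
  decide

theorem remove_mentions_tight : Claim_exact_remove_mentions := by
  intro text _ hD heq
  unfold D_remove_mentions at hD
  have hcount := congrArg (fun z : String => z.toList.count '<') heq
  simp only at hcount
  unfold remove_mentions remove_mentions_alt at hcount
  rw [pvSquash_count, pvSquash_count, String.toList_ofList, String.toList_ofList,
    pvCoreA_eq_pvG text.toList.length text.toList 0 (by omega),
    pvCoreB_eq_pvH text.toList.length text.toList 0 [] (by omega)] at hcount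
  simp only [List.take_zero, List.drop_zero, List.nil_append] at hcount
  have := pvCount_lt text.toList.length text.toList (le_refl _) hD
  omega
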